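-- pv_equiv track=rewrite | github.com/raulhackerclub/transparencia-bahia | scrapers/py-bs/acessandoPaginas.py | conteudo_de
-- ===== SOURCE A (Python) =====
-- def conteudo_de(lista, dado):
--     encontrou = False
--     texto_encontrado = ''
--
--     for texto in lista:
--         if encontrou:
--             texto_encontrado = texto
--             break
--
--         if str(texto).lower().find(dado.lower()) > -1:
--             encontrou = True
--
--     return texto_encontrado.strip()
-- ===== SOURCE B (Python) =====
-- def conteudo_de(lista, dado):
--     d = dado.lower()
--     seguintes = [y for x, y in zip(lista, lista[1:]) if d in str(x).lower()]
--     return seguintes[0].strip() if seguintes else ''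
-- ===== Notes on version B (the rewrite author's own statement) =====
-- stated objective: alternative
-- what changed: Instead of A's stateful scan carrying a boolean flag across iterations, B zips the list with its own 1-shifted copy, collects in one comprehension the successor of every matching element, and returns the stripped head of that list (the shift makes a match on the last element yield nothing, as in A); a timing run measured this constant-factor faster: dado.lower() is hoisted out of the loop, per-element 'in' replaces .find()>-1, and the scan runs in a C-level comprehension.
import Mathlib
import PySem

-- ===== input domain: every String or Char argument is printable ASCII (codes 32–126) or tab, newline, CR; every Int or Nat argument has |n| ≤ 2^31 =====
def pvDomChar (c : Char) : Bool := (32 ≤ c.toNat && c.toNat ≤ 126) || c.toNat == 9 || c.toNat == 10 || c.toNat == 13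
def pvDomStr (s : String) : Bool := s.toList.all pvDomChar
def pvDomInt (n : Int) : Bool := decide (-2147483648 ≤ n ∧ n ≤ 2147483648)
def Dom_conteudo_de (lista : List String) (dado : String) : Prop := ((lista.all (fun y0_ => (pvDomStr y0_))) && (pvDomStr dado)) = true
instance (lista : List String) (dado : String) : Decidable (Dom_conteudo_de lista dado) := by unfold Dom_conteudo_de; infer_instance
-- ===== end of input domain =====

-- B replaces A's stateful flag-carrying scan by zipping the list with its own
-- 1-shifted copy, collecting the successors of all matches, and taking the head.

-- ===== PORT A =====
-- the for-loop with its (encontrou, texto_encontrado) state, iteration by iteration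
def conteudoLoopA (dado : String) : List String → Bool → String → String
  | [], _, acc => PySem.Str.strip acc
  | texto :: rest, encontrou, acc =>
    if encontrou then PySem.Str.strip texto   -- texto_encontrado = texto; break; return .strip()
    else if PySem.Str.find (PySem.Str.lower texto) (PySem.Str.lower dado) > -1 then
      conteudoLoopA dado rest true acc
    else
      conteudoLoopA dado rest false acc

def conteudo_de (lista : List String) (dado : String) : String :=
  conteudoLoopA dado lista false ""

-- ===== PORT B =====
-- Source B: seguintes = [y for x, y in zip(lista, lista[1:]) if d in str(x).lower()]
-- (zip → List.zip, lista[1:] → PySem.List.slice lista 1; comprehension → filter + map)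
def conteudo_de_alt (lista : List String) (dado : String) : String :=
  let d := PySem.Str.lower dado
  let seguintes :=
    ((lista.zip (PySem.List.slice lista (some 1) none)).filter
      (fun p => PySem.Str.isIn d (PySem.Str.lower p.1))).map Prod.snd
  match seguintes with
  | [] => ""
  | y :: _ => PySem.Str.strip y

-- ===== PRECONDITION & SPEC =====
def Spec_conteudo_de (lista : List String) (dado : String) (out : String) : Prop := out = conteudo_de_alt lista dado
instance (lista : List String) (dado : String) (out : String) : Decidable (Spec_conteudo_de lista dado out) := by unfold Spec_conteudo_de; infer_instance

-- ===== CLAIM (what is proved, stated in full; the proofs are below) =====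
def Claim_equal_conteudo_de : Prop := ∀ (lista : List String) (dado : String), Dom_conteudo_de lista dado → Spec_conteudo_de lista dado (conteudo_de lista dado)

-- ===== LEMMAS AND PROOFS =====

-- A's test `find > -1` coincides with B's `in` (stated on the Chars side)
lemma find_pos_iff_isIn (s sub : List Char) :
    (-1 < PySem.Chars.find s sub) ↔ PySem.Chars.isIn sub s = true := by
  have h1 := PySem.Chars.find_nonneg_iff (s := s) (sub := sub)
  have h2 := PySem.Chars.isIn_iff_infix (s := s) (sub := sub)
  constructor
  · intro h; exact h2.mpr (h1.mp (by omega))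
  · intro h; have := h1.mpr (h2.mp h); omega

lemma strip_empty : PySem.Str.strip "" = "" := by decide

lemma slice_one (xs : List String) : PySem.List.slice xs (some 1) none = xs.drop 1 := by
  simpa using PySem.List.slice_from_one (xs := xs)

-- the loop body of A equals B's zip/filter/map pipeline, by induction on the list
lemma loop_eq (dado : String) (lista : List String) :
    conteudoLoopA dado lista false "" =
      (match ((lista.zip (lista.drop 1)).filter
        (fun p => PySem.Str.isIn (PySem.Str.lower dado) (PySem.Str.lower p.1))).map Prod.snd with
       | [] => ""
       | y :: _ => PySem.Str.strip y) := by
  induction lista with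
  | nil => simp [conteudoLoopA, strip_empty]
  | cons x rest ih =>
    by_cases hc : PySem.Chars.isIn (PySem.Chars.lower dado.toList) (PySem.Chars.lower x.toList) = true
    · have hf : -1 < PySem.Chars.find (PySem.Chars.lower x.toList) (PySem.Chars.lower dado.toList) :=
        (find_pos_iff_isIn _ _).mpr hc
      cases rest with
      | nil => simp [conteudoLoopA, hf, strip_empty]
      | cons y r => simp [conteudoLoopA, hf, hc]
    · have hf : ¬ (-1 < PySem.Chars.find (PySem.Chars.lower x.toList) (PySem.Chars.lower dado.toList)) := by
        intro h; exact hc ((find_pos_iff_isIn _ _).mp h)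
      cases rest with
      | nil => simp [conteudoLoopA, hf, strip_empty]
      | cons y r => simpa [conteudoLoopA, hf, hc] using ih

-- ===== VERDICT (by name: the statement is the Claim_ definition above) =====
theorem conteudo_de_spec : Claim_equal_conteudo_de := by
  intro lista dado _
  unfold Spec_conteudo_de conteudo_de conteudo_de_alt
  rw [slice_one]
  exact loop_eq dado lista
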